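-- pv_equiv track=rewrite | github.com/totoLab/code-ingegneria-informatica | fondamentiDiInformatica1/simulazioni_esame/13092021/13set2021.py | clienti_attivi
-- ===== SOURCE A (Python) =====
-- def clienti_attivi(matrice_prenotazioni):
--     clienti = {}
--     for prenotazione in matrice_prenotazioni:
--         cognome = prenotazione[0]
--         if cognome in clienti:
--             clienti[cognome] += 1
--         else:
--             clienti[cognome] = 1
--
--     max = 0
--     lista_attivi = []
--     for cliente in clienti:
--         numero_operazioni = clienti[cliente]
--         if numero_operazioni > max:
--             max = numero_operazioni
--             lista_attivi = [cliente]
--         elif numero_operazioni == max: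
--             lista_attivi.append(cliente)
--
--     return lista_attivi
-- ===== SOURCE B (Python) =====
-- def clienti_attivi(matrice_prenotazioni):
--     cognomi = [prenotazione[0] for prenotazione in matrice_prenotazioni]
--     distinti = []
--     for cognome in cognomi:
--         if cognome not in distinti:
--             distinti.append(cognome)
--     mx = max((cognomi.count(c) for c in distinti), default=0)
--     return [c for c in distinti if cognomi.count(c) == mx]
-- ===== Notes on version B (the rewrite author's own statement) =====
-- stated objective: alternative
-- what changed: A builds a surname->count dict and tracks the maximum and result list in one interleaved pass; B uses no dict at all: it extracts the surname column, deduplicates it in first-appearance order, computes the peak count once with max(...,default=0) over list.count, and filters the dedup list by that peak.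
import Mathlib
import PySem

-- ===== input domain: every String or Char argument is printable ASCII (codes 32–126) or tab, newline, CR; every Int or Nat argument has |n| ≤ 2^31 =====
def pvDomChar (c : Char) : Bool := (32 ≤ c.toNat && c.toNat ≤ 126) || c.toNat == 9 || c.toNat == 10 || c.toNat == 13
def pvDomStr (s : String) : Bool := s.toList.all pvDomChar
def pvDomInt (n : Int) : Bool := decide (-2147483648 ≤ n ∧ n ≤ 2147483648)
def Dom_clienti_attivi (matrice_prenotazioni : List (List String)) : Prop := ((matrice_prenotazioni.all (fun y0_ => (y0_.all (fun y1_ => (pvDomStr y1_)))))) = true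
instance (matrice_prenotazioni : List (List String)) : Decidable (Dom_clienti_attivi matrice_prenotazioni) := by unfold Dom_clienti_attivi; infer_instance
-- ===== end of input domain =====

-- B replaces A's dict-counting plus interleaved max-tracking pass by a dict-free decomposition:
-- extract the surname column, dedup it in first-appearance order, take the max of the per-surname
-- counts, and filter the dedup list by that max (objective: alternative; not faster).

-- ===== PORT A =====
def clienti_attivi (matrice_prenotazioni : List (List String)) : List String :=
  let clienti : PySem.Dict String Int :=
    matrice_prenotazioni.foldl (fun d prenotazione =>
      match PySem.List.pyGet? prenotazione 0 with
      | none => d            -- prenotazione[0] raises IndexError in Python; Pre_ excludes empty rows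
      | some cognome =>
          if d.contains cognome then d.insert cognome (d.getD cognome 0 + 1)
          else d.insert cognome 1) PySem.Dict.empty
  let r := clienti.keys.foldl (fun (st : Int × List String) cliente =>
      let numero_operazioni := clienti.getD cliente 0
      if numero_operazioni > st.1 then (numero_operazioni, [cliente])
      else if numero_operazioni == st.1 then (st.1, st.2 ++ [cliente])
      else st) ((0 : Int), ([] : List String))
  r.2

-- ===== PORT B =====
def clienti_attivi_alt (matrice_prenotazioni : List (List String)) : List String :=
  let cognomi := matrice_prenotazioni.map (fun prenotazione =>
      (PySem.List.pyGet? prenotazione 0).getD "")   -- prenotazione[0]; Pre_ excludes empty rows (IndexError)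
  let distinti := cognomi.foldl (fun acc cognome =>
      if acc.contains cognome then acc else acc ++ [cognome]) ([] : List String)
  let mx : Int := PySem.List.maxD (distinti.map (fun c => (PySem.List.count cognomi c : Int))) (fun x => x) 0
  distinti.filter (fun c => (PySem.List.count cognomi c : Int) == mx)

-- ===== PRECONDITION & SPEC =====
-- Pre_ excludes exactly the inputs with an empty row, on which Python A raises IndexError (prenotazione[0]).
def Pre_clienti_attivi (matrice_prenotazioni : List (List String)) : Prop :=
  ∀ p ∈ matrice_prenotazioni, p ≠ []
instance (matrice_prenotazioni : List (List String)) : Decidable (Pre_clienti_attivi matrice_prenotazioni) := by unfold Pre_clienti_attivi; infer_instance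
def pvWitness_clienti_attivi : List (List String) := [["Rossi", "x"], ["Verdi"], ["Rossi"]]
def Spec_clienti_attivi (matrice_prenotazioni : List (List String)) (out : List String) : Prop := out = clienti_attivi_alt matrice_prenotazioni
instance (matrice_prenotazioni : List (List String)) (out : List String) : Decidable (Spec_clienti_attivi matrice_prenotazioni out) := by unfold Spec_clienti_attivi; infer_instance

-- ===== CLAIM (what is proved, stated in full; the proofs are below) =====
def Claim_equal_clienti_attivi : Prop := ∀ (matrice_prenotazioni : List (List String)), Dom_clienti_attivi matrice_prenotazioni → Pre_clienti_attivi matrice_prenotazioni → Spec_clienti_attivi matrice_prenotazioni (clienti_attivi matrice_prenotazioni)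

-- ===== LEMMAS AND PROOFS =====

-- a key absent from the dict reads as the default 0
theorem pv_getD_of_not_contains (d : PySem.Dict String Int) (x : String)
    (h : d.contains x = false) : d.getD x 0 = 0 := by
  simp only [PySem.Dict.contains, List.any_eq_false] at h
  simp only [PySem.Dict.getD, PySem.Dict.get?, List.find?_eq_none.mpr h, Option.map_none, Option.getD_none]

-- A's counting loop builds Counter(cognomi) where cognomi is the surname column
theorem pv_countA (m : List (List String)) (hpre : ∀ p ∈ m, p ≠ []) :
    m.foldl (fun d prenotazione =>
      match PySem.List.pyGet? prenotazione 0 with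
      | none => d
      | some cognome =>
          if d.contains cognome then d.insert cognome (d.getD cognome 0 + 1)
          else d.insert cognome 1) (PySem.Dict.empty : PySem.Dict String Int)
    = PySem.Dict.counter (m.map (fun p => (PySem.List.pyGet? p 0).getD "")) := by
  rw [← PySem.Dict.foldl_insert_getD_add_one_eq_counter, List.foldl_map]
  apply PySem.List.foldl_congr_mem
  intro d p hp
  obtain ⟨a, t, rfl⟩ : ∃ a t, p = a :: t := by
    cases p with
    | nil => exact absurd rfl (hpre _ hp)
    | cons a t => exact ⟨a, t, rfl⟩
  have hget : PySem.List.pyGet? (a :: t) 0 = some a := by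
    simp [PySem.List.pyGet?, PySem.List.pyIdx?]
  rw [hget]
  simp only [Option.getD_some]
  by_cases hc : d.contains a
  · simp [hc]
  · simp only [Bool.not_eq_true] at hc
    simp [hc, pv_getD_of_not_contains d a hc]

-- A's interleaved max-tracking pass computes the running max and the filter by it
theorem pv_phase2 (f : String → Int) (l : List String) :
    l.foldl (fun (st : Int × List String) c =>
      if f c > st.1 then (f c, [c])
      else if f c == st.1 then (st.1, st.2 ++ [c])
      else st) ((0 : Int), ([] : List String))
    = (l.foldl (fun a c => max a (f c)) 0,
       l.filter (fun c => f c == l.foldl (fun a c => max a (f c)) 0)) := by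
  induction l using List.reverseRecOn with
  | nil => simp
  | append_singleton l c ih =>
      rw [List.foldl_append, List.foldl_append, ih]
      have hub : ∀ x ∈ l, f x ≤ l.foldl (fun a c => max a (f c)) 0 :=
        (PySem.List.le_foldl_max_int l f 0).2
      simp only [List.foldl_cons, List.foldl_nil, List.filter_append]
      by_cases hgt : l.foldl (fun a c => max a (f c)) 0 < f c
      · have hmax : max (l.foldl (fun a c => max a (f c)) 0) (f c) = f c := by omega
        have hnil : l.filter (fun x => f x == f c) = [] := by
          rw [List.filter_eq_nil_iff]
          intro x hx
          have := hub x hx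
          simp only [beq_iff_eq]
          omega
        simp [hgt, hmax, hnil]
      · push Not at hgt
        have hmax : max (l.foldl (fun a c => max a (f c)) 0) (f c)
            = l.foldl (fun a c => max a (f c)) 0 := by omega
        rw [hmax]
        by_cases heq : f c = l.foldl (fun a c => max a (f c)) 0
        · simp [heq]
        · have : ¬ f c > l.foldl (fun a c => max a (f c)) 0 := not_lt.mpr hgt
          simp [this, heq]

-- B's max(…, default=0) is the running max, given every listed count is ≥ 1
theorem pv_maxD (f : String → Int) (l : List String) (hpos : ∀ c ∈ l, 1 ≤ f c) :
    PySem.List.maxD (l.map f) (fun x => x) 0 = l.foldl (fun a c => max a (f c)) 0 := by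
  cases l with
  | nil => rfl
  | cons a t =>
      have h1 : 1 ≤ f a := hpos a (by simp)
      simp only [List.map_cons, PySem.List.maxD, PySem.List.max?_id_cons, Option.getD_some,
        List.foldl_cons]
      rw [List.foldl_map]
      have : max 0 (f a) = f a := by omega
      rw [this]

-- ===== VERDICT (by name: the statement is the Claim_ definition above) =====
theorem clienti_attivi_spec : Claim_equal_clienti_attivi := by
  intro m _ hpre
  unfold Spec_clienti_attivi clienti_attivi clienti_attivi_alt
  simp only []
  simp only [PySem.List.count_eq]
  rw [pv_countA m hpre]
  set cognomi := m.map (fun p => (PySem.List.pyGet? p 0).getD "") with hcog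
  have hkeys : (PySem.Dict.counter cognomi).keys = PySem.Set.ofList cognomi :=
    PySem.Dict.keys_counter cognomi
  have hdist : cognomi.foldl (fun acc c => if acc.contains c then acc else acc ++ [c]) [] =
      PySem.Set.ofList cognomi := by
    rw [PySem.Set.ofList_eq_foldl]
    rfl
  rw [hkeys, hdist]
  have hgetD : ∀ st c, ((fun (st : Int × List String) cliente =>
        let numero_operazioni := (PySem.Dict.counter cognomi).getD cliente 0
        if numero_operazioni > st.1 then (numero_operazioni, [cliente])
        else if numero_operazioni == st.1 then (st.1, st.2 ++ [cliente])
        else st) st c)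
      = ((fun (st : Int × List String) c =>
        if (cognomi.count c : Int) > st.1 then ((cognomi.count c : Int), [c])
        else if (cognomi.count c : Int) == st.1 then (st.1, st.2 ++ [c])
        else st) st c) := by
    intro st c
    simp only [PySem.Dict.getD_counter]
  simp only [hgetD]
  rw [pv_phase2 (fun c => (cognomi.count c : Int)) (PySem.Set.ofList cognomi)]
  rw [pv_maxD (fun c => (cognomi.count c : Int)) (PySem.Set.ofList cognomi)
      (by
        intro c hc
        have hmem : c ∈ cognomi := (PySem.Set.mem_ofList cognomi c).1 hc
        have := List.count_pos_iff.mpr hmem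
        show (1:Int) ≤ (List.count c cognomi : Int)
        exact_mod_cast this)]
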